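-- pv_equiv track=rewrite | github.com/yilinan23/COMP550_FP | src/syntax_rl/evaluation/benchmark_vs_rl.py | _cap_sample_counts
-- ===== SOURCE A (Python) =====
-- def _cap_sample_counts(sample_counts: dict[str, int], max_total_examples: int) -> dict[str, int]:
--     capped = {group: count for group, count in sample_counts.items() if count > 0}
--     while sum(capped.values()) > max_total_examples and capped:
--         largest_group = max(
--             sorted(capped),
--             key=lambda group: (capped[group], group),
--         )
--         capped[largest_group] -= 1
--         if capped[largest_group] <= 0:
--             del capped[largest_group]
--     return capped
-- ===== SOURCE B (Python) =====
-- def _cap_sample_counts(sample_counts: dict[str, int], max_total_examples: int) -> dict[str, int]: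
--     capped = {group: count for group, count in sample_counts.items() if count > 0}
--     while True:
--         total = sum(capped.values())
--         need = total - max_total_examples
--         if need <= 0 or not capped:
--             return capped
--         m = max(capped.values())
--         m2 = max((c for c in capped.values() if c != m), default=0)
--         tcount = sum(1 for c in capped.values() if c == m)
--         layers = min(need // tcount, m - m2)
--         if layers >= 1:
--             # peel `layers` whole layers off every group currently at the top level
--             capped = {g: v for g, c in capped.items()
--                       if (v := c - layers if c == m else c) > 0}
--         else:
--             # need < tcount: resolve the partial layer; ties at the top level are
--             # decremented largest-name-first, exactly the (count, group) order
--             victims = set(sorted((g for g, c in capped.items() if c == m),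
--                                  reverse=True)[:need])
--             return {g: v for g, c in capped.items()
--                     if (v := c - 1 if g in victims else c) > 0}
-- ===== Notes on version B (the rewrite author's own statement) =====
-- stated objective: faster
-- what changed: A removes one unit per iteration, rescanning and re-sorting the whole dict to find the (count,group)-largest entry each time; B peels whole layers in bulk arithmetic (decrementing every top-level group by min(need//tcount, m - m2) at once) and resolves the final partial layer by taking the `need` lexicographically largest top-level groups in one sort.
import Mathlib
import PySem

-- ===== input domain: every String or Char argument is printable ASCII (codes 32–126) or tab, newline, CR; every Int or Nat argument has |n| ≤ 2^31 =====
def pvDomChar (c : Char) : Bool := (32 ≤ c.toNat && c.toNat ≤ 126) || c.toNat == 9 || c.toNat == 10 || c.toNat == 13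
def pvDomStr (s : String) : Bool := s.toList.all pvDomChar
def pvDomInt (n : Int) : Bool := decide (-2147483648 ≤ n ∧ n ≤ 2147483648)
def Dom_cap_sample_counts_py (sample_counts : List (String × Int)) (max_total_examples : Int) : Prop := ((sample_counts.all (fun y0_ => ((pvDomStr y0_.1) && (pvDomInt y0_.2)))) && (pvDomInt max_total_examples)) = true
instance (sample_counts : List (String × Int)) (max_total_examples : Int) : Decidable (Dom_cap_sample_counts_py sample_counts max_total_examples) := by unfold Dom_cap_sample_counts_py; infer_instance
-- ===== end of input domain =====

-- B replaces A's one-unit-per-iteration capping loop by bulk layer peeling (equal return values; measurably faster).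

-- ===== PORT A =====
-- A-side helpers: dict lookup `capped[g]` (keys always present at every use site), sum of dict values,
-- and the termination-measure helpers/lemmas the recursive loops cite in `decreasing_by`.
def pvLookup (c : List (String × Int)) (g : String) : Int :=
  PySem.Dict.getD (PySem.Dict.mk c) g 0

def pvSum (c : List (String × Int)) : Int := (List.map Prod.snd c).sum

def pvToNatSum (c : List (String × Int)) : Nat := (List.map (fun p => p.2.toNat) c).sum

lemma pv_toNatSum_map_le (c : List (String × Int)) (f : (String × Int) → (String × Int))
    (hf : ∀ p ∈ c, (f p).2.toNat ≤ p.2.toNat) :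
    pvToNatSum (List.map f c) ≤ pvToNatSum c := by
  induction c with
  | nil => simp [pvToNatSum]
  | cons p t ih =>
    have h1 := hf p (by simp)
    have h2 := ih (fun q hq => hf q (by simp [hq]))
    simp only [pvToNatSum, List.map_cons, List.sum_cons] at *
    omega

lemma pv_toNatSum_map_lt (c : List (String × Int)) (f : (String × Int) → (String × Int))
    (hf : ∀ p ∈ c, (f p).2.toNat ≤ p.2.toNat) (q : String × Int) (hq : q ∈ c)
    (hlt : (f q).2.toNat < q.2.toNat) :
    pvToNatSum (List.map f c) < pvToNatSum c := by
  induction c with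
  | nil => simp at hq
  | cons p t ih =>
    have h1 := hf p (by simp)
    simp only [pvToNatSum, List.map_cons, List.sum_cons]
    rcases List.mem_cons.mp hq with h | h
    · subst h
      have h2 := pv_toNatSum_map_le t f (fun r hr => hf r (by simp [hr]))
      simp only [pvToNatSum] at h2; omega
    · have h2 := ih (fun r hr => hf r (by simp [hr])) h
      simp only [pvToNatSum] at h2; omega

lemma pv_toNatSum_filter_le (c : List (String × Int)) (q : (String × Int) → Bool) :
    pvToNatSum (List.filter q c) ≤ pvToNatSum c := by
  induction c with
  | nil => simp [pvToNatSum]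
  | cons p t ih =>
    simp only [pvToNatSum, List.filter_cons] at *
    split <;> simp only [List.map_cons, List.sum_cons] <;> omega

lemma pv_max2_exists {α κ₁ κ₂ : Type} [LT κ₁] [DecidableLT κ₁] [LT κ₂] [DecidableLT κ₂]
    (xs : List α) (k1 : α → κ₁) (k2 : α → κ₂) (hne : xs ≠ []) :
    ∃ g, PySem.List.max2? xs k1 k2 = some g ∧ g ∈ xs := by
  have aux : ∀ (ys : List α) (acc : Option α) (g : α),
      List.foldl (fun acc x =>
        match acc with
        | none => some x
        | some m => if (decide (k1 m < k1 x) || !decide (k1 x < k1 m) && decide (k2 m < k2 x)) = true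
            then some x else some m) acc ys = some g → acc = some g ∨ g ∈ ys := by
    intro ys
    induction ys with
    | nil => intro acc g h; simp at h; exact Or.inl h
    | cons z rest ih =>
      intro acc g h
      simp only [List.foldl_cons] at h
      rcases ih _ g h with h2 | h2
      · cases acc with
        | none => simp at h2; right; simp [h2]
        | some m =>
          simp only at h2
          split at h2
          · right; simp at h2; simp [h2]
          · left; simpa using h2
      · right; simp [h2]
  have aux2 : ∀ (ys : List α) (a : α),
      ∃ g, List.foldl (fun acc x =>
        match acc with
        | none => some x
        | some m => if (decide (k1 m < k1 x) || !decide (k1 x < k1 m) && decide (k2 m < k2 x)) = true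
            then some x else some m) (some a) ys = some g := by
    intro ys
    induction ys with
    | nil => intro a; exact ⟨a, rfl⟩
    | cons z rest ih =>
      intro a
      simp only [List.foldl_cons]
      split
      · exact ih z
      · exact ih a
  cases xs with
  | nil => exact absurd rfl hne
  | cons x t =>
    obtain ⟨g, hg⟩ := aux2 t x
    have : PySem.List.max2? (x :: t) k1 k2 = some g := by
      simpa [PySem.List.max2?] using hg
    rcases aux (x :: t) none g (by simpa [PySem.List.max2?] using this) with h | h
    · simp at h
    · exact ⟨g, this, h⟩

lemma pv_lookup_exists (c : List (String × Int)) (g : String) (hg : g ∈ List.map Prod.fst c) :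
    ∃ p, p ∈ c ∧ p.1 = g ∧ p.2 = pvLookup c g := by
  obtain ⟨p, hp, hfst⟩ := List.mem_map.mp hg
  have hfind : ∃ q, List.find? (fun r => r.1 == g) c = some q := by
    have : (List.find? (fun r => r.1 == g) c).isSome := by
      apply List.find?_isSome.mpr
      exact ⟨p, hp, by simp [hfst]⟩
    exact Option.isSome_iff_exists.mp this
  obtain ⟨q, hq⟩ := hfind
  refine ⟨q, List.mem_of_find?_eq_some hq, by simpa using List.find?_some hq, ?_⟩
  simp [pvLookup, PySem.Dict.getD, PySem.Dict.get?, PySem.Dict.items, hq]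

lemma pv_lookup_map_dec (c : List (String × Int)) (g : String)
    (hg : g ∈ List.map Prod.fst c) :
    pvLookup (List.map (fun p => if p.1 == g then (p.1, p.2 - 1) else p) c) g = pvLookup c g - 1 := by
  induction c with
  | nil => simp at hg
  | cons p t ih =>
    by_cases h : p.1 = g
    · simp [pvLookup, PySem.Dict.getD, PySem.Dict.get?, PySem.Dict.items, List.find?_cons, h]
    · have hg' : g ∈ List.map Prod.fst t := by
        rcases List.mem_map.mp hg with ⟨q, hq, hfst⟩
        rcases List.mem_cons.mp hq with rfl | hq'
        · exact absurd hfst h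
        · exact List.mem_map.mpr ⟨q, hq', hfst⟩
      have := ih hg'
      simpa [pvLookup, PySem.Dict.getD, PySem.Dict.get?, PySem.Dict.items, List.find?_cons, h] using this

lemma pv_fst_map_dec (c : List (String × Int)) (g : String) :
    List.map Prod.fst (List.map (fun p => if p.1 == g then (p.1, p.2 - 1) else p) c)
      = List.map Prod.fst c := by
  rw [List.map_map]
  apply List.map_congr_left
  intro p _
  by_cases h : p.1 = g <;> simp [h]

-- capped[largest_group] -= 1  (overwrite in place)
def pvDec1 (g : String) (c : List (String × Int)) : List (String × Int) :=
  List.map (fun p => if p.1 == g then (p.1, p.2 - 1) else p) c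

-- del capped[largest_group]
def pvErase (g : String) (c : List (String × Int)) : List (String × Int) :=
  List.filter (fun p => !(p.1 == g)) c

def pvKeys (c : List (String × Int)) : List String := List.map Prod.fst c

-- the while loop of A: on every pass, re-sort the keys, pick the (count, group)-largest
-- group, decrement it by one, delete it if it reached zero.
def pvLoopA (c : List (String × Int)) (M : Int) : List (String × Int) :=
  if hc : M < pvSum c ∧ c ≠ [] then
    -- largest_group = max(sorted(capped), key=lambda group: (capped[group], group))
    -- (max() on a nonempty list always returns; the `.getD ""` default is never used)
    let g := (PySem.List.max2? (PySem.List.sorted (pvKeys c) (fun g => g) false)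
        (fun g => pvLookup c g) (fun g => g)).getD ""
    if hdel : pvLookup (pvDec1 g c) g ≤ 0 then
      pvLoopA (pvErase g (pvDec1 g c)) M
    else
      pvLoopA (pvDec1 g c) M
  else c
termination_by pvToNatSum c + c.length
decreasing_by
  · -- delete branch: the entry named g disappears, nothing grows
    show pvToNatSum (pvErase g (pvDec1 g c)) + (pvErase g (pvDec1 g c)).length
      < pvToNatSum c + c.length
    have hsne : PySem.List.sorted (pvKeys c) (fun g => g) false ≠ [] := by
      simp only [ne_eq, PySem.List.sorted_eq_nil_iff]
      simpa [pvKeys] using hc.2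
    obtain ⟨g0, hg0, hg0mem⟩ :=
      pv_max2_exists (PySem.List.sorted (pvKeys c) (fun g => g) false)
        (fun g => pvLookup c g) (fun g => g) hsne
    have hgg : g = g0 := by simp [g, hg0]
    have hgk : g ∈ List.map Prod.fst c := by
      rw [hgg]; exact ((PySem.List.sorted_perm _ _ _).mem_iff).mp hg0mem
    have hgk' : g ∈ List.map Prod.fst (pvDec1 g c) := by
      rw [pvDec1, pv_fst_map_dec]; exact hgk
    obtain ⟨q, hq, hq1, _⟩ := pv_lookup_exists _ _ hgk'
    have h1 : pvToNatSum (pvErase g (pvDec1 g c)) ≤ pvToNatSum c := by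
      calc pvToNatSum (pvErase g (pvDec1 g c))
          ≤ pvToNatSum (pvDec1 g c) := pv_toNatSum_filter_le _ _
        _ ≤ pvToNatSum c := by
            apply pv_toNatSum_map_le
            intro p _
            by_cases h : p.1 = g <;> simp [h] <;> omega
    have h2 : (pvErase g (pvDec1 g c)).length < (pvDec1 g c).length := by
      apply List.length_filter_lt_length_iff_exists.mpr
      exact ⟨q, hq, by simp [hq1]⟩
    have h3 : (pvDec1 g c).length = c.length := by simp [pvDec1]
    omega
  · -- decrement-only branch: g's count was ≥ 2, its summand strictly drops
    show pvToNatSum (pvDec1 g c) + (pvDec1 g c).length < pvToNatSum c + c.length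
    have hsne : PySem.List.sorted (pvKeys c) (fun g => g) false ≠ [] := by
      simp only [ne_eq, PySem.List.sorted_eq_nil_iff]
      simpa [pvKeys] using hc.2
    obtain ⟨g0, hg0, hg0mem⟩ :=
      pv_max2_exists (PySem.List.sorted (pvKeys c) (fun g => g) false)
        (fun g => pvLookup c g) (fun g => g) hsne
    have hgg : g = g0 := by simp [g, hg0]
    have hgk : g ∈ List.map Prod.fst c := by
      rw [hgg]; exact ((PySem.List.sorted_perm _ _ _).mem_iff).mp hg0mem
    have hlk := pv_lookup_map_dec c g hgk
    obtain ⟨q, hq, hq1, hq2⟩ := pv_lookup_exists c g hgk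
    rw [pvDec1] at hdel
    have hq2' : 2 ≤ q.2 := by omega
    have h1 : pvToNatSum (pvDec1 g c) < pvToNatSum c := by
      apply pv_toNatSum_map_lt c _ ?_ q hq
      · simp [hq1]; omega
      · intro p _
        by_cases h : p.1 = g <;> simp [h] <;> omega
    have h3 : (pvDec1 g c).length = c.length := by simp [pvDec1]
    omega

-- capped = {group: count for group, count in sample_counts.items() if count > 0}
-- (shared by both ports: the first line of A and of B is identical)
def pvCapped (sample_counts : List (String × Int)) : List (String × Int) :=
  (List.foldl (fun d p => if 0 < p.2 then d.insert p.1 p.2 else d)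
    PySem.Dict.empty (PySem.Dict.ofList sample_counts).items).items

def cap_sample_counts_py (sample_counts : List (String × Int)) (max_total_examples : Int) :
    List (String × Int) :=
  pvLoopA (pvCapped sample_counts) max_total_examples

-- ===== PORT B =====
-- B-side helpers: values list, bulk layer peel, top-level names, partial layer.
def pvVals (c : List (String × Int)) : List Int := List.map Prod.snd c

-- capped = {g: v for g, c in capped.items() if (v := c - layers if c == m else c) > 0}
def pvPeel (m layers : Int) (c : List (String × Int)) : List (String × Int) :=
  (List.map (fun p => if p.2 == m then (p.1, p.2 - layers) else p) c).filter
    (fun p => 0 < p.2)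

-- the names of the groups currently at the top count m, in dict order
def pvTops (m : Int) (c : List (String × Int)) : List String :=
  List.map Prod.fst (c.filter (fun p => p.2 == m))

-- {g: v for g, c in capped.items() if (v := c - 1 if g in victims else c) > 0}
def pvPartial (victims : List String) (c : List (String × Int)) : List (String × Int) :=
  (List.map (fun p => if p.1 ∈ victims then (p.1, p.2 - 1) else p) c).filter
    (fun p => 0 < p.2)

lemma pv_measB_lt (c : List (String × Int)) (m layers : Int) (hne : c ≠ [])
    (hmem : m ∈ List.map Prod.snd c) (hub : ∀ v ∈ List.map Prod.snd c, v ≤ m)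
    (hl : 1 ≤ layers) :
    pvToNatSum (pvPeel m layers c) + (pvPeel m layers c).length
      < pvToNatSum c + c.length := by
  rw [pvPeel]
  by_cases hm : 1 ≤ m
  · obtain ⟨q, hq, hq2⟩ := List.mem_map.mp hmem
    have h1 : pvToNatSum (List.map (fun p => if p.2 == m then (p.1, p.2 - layers) else p) c)
        < pvToNatSum c := by
      apply pv_toNatSum_map_lt c _ ?_ q hq
      · simp [hq2]; omega
      · intro p _
        by_cases h : p.2 = m <;> simp [h] <;> omega
    have h2 := pv_toNatSum_filter_le
      (List.map (fun p => if p.2 == m then (p.1, p.2 - layers) else p) c) (fun p => 0 < p.2)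
    have h3 := List.length_filter_le (fun p => (decide (0 < p.2)))
      (List.map (fun p => if p.2 == m then (p.1, p.2 - layers) else p) c)
    simp only [List.length_map] at h3
    omega
  · have hnil : (List.map (fun p => if p.2 == m then (p.1, p.2 - layers) else p) c).filter
        (fun p => 0 < p.2) = [] := by
      apply List.filter_eq_nil_iff.mpr
      intro p hp
      obtain ⟨q, hq, hfq⟩ := List.mem_map.mp hp
      have hv := hub q.2 (List.mem_map.mpr ⟨q, hq, rfl⟩)
      by_cases h : q.2 = m
      · simp [h] at hfq; subst hfq; simp; omega
      · simp [h] at hfq; subst hfq; simp; omega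
    rw [hnil]
    have : 1 ≤ c.length := by
      cases c with
      | nil => exact absurd rfl hne
      | cons a t => simp
    simp [pvToNatSum]
    omega

-- same cap, computed by bulk layer peeling instead of unit decrements
def pvLoopB (c : List (String × Int)) (M : Int) : List (String × Int) :=
  let need := pvSum c - M
  if hq : need ≤ 0 ∨ c = [] then c
  else
    -- m = max(capped.values()); c ≠ [] here, so the default is never used
    let m := PySem.List.maxD (pvVals c) (fun v => v) 0
    -- m2 = max((v for v in values if v != m), default=0)
    let m2 := PySem.List.maxD ((pvVals c).filter (fun v => !(v == m))) (fun v => v) 0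
    -- tcount = sum(1 for v in values if v == m)
    let tcount : Int := ((pvVals c).countP (fun v => v == m) : Int)
    let layers := min (PySem.Int.floordiv need tcount) (m - m2)
    if hl : 1 ≤ layers then
      pvLoopB (pvPeel m layers c) M
    else
      -- need < tcount: one partial layer, largest names first
      let victims := (PySem.List.sorted (pvTops m c) (fun g => g) true).take need.toNat
      pvPartial victims c
termination_by pvToNatSum c + c.length
decreasing_by
  show pvToNatSum (pvPeel m layers c) + (pvPeel m layers c).length
      < pvToNatSum c + c.length
  push_neg at hq
  have hne : c ≠ [] := hq.2
  have hvne : pvVals c ≠ [] := by simpa [pvVals] using hne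
  have hsome : PySem.List.max? (pvVals c) (fun v => v) = some m :=
    PySem.List.max?_eq_some_maxD (pvVals c) (fun v => v) 0 hvne
  have hmem : m ∈ List.map Prod.snd c := by
    have := PySem.List.max?_mem hsome
    simpa [pvVals] using this
  have hub : ∀ v ∈ List.map Prod.snd c, v ≤ m := by
    intro v hv
    exact PySem.List.max?_isMax hsome v (by simpa [pvVals] using hv)
  exact pv_measB_lt c m layers hne hmem hub hl

def cap_sample_counts_py_alt (sample_counts : List (String × Int)) (max_total_examples : Int) :
    List (String × Int) :=
  pvLoopB (pvCapped sample_counts) max_total_examples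

-- ===== PRECONDITION & SPEC =====
def Spec_cap_sample_counts_py (sample_counts : List (String × Int)) (max_total_examples : Int) (out : List (String × Int)) : Prop := out = cap_sample_counts_py_alt sample_counts max_total_examples
instance (sample_counts : List (String × Int)) (max_total_examples : Int) (out : List (String × Int)) : Decidable (Spec_cap_sample_counts_py sample_counts max_total_examples out) := by unfold Spec_cap_sample_counts_py; infer_instance

-- ===== CLAIM (what is proved, stated in full; the proofs are below) =====
def Claim_equal_cap_sample_counts_py : Prop := ∀ (sample_counts : List (String × Int)) (max_total_examples : Int), Dom_cap_sample_counts_py sample_counts max_total_examples → Spec_cap_sample_counts_py sample_counts max_total_examples (cap_sample_counts_py sample_counts max_total_examples)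

-- ===== LEMMAS AND PROOFS =====

-- the normal form both loops are reduced to: starting from a clean state c, the entries whose
-- ORIGINAL count is m have been decremented by i whole layers plus one more unit when their
-- name lies in D; entries that reach 0 are removed.
def pvDecD (D : List String) (i m : Int) (c : List (String × Int)) : List (String × Int) :=
  (List.map (fun p => if p.2 == m then (p.1, p.2 - i - (if p.1 ∈ D then (1 : Int) else 0)) else p) c).filter
    (fun p => 0 < p.2)

-- the j lexicographically largest names among the groups whose count is m
def pvTopN (c : List (String × Int)) (m : Int) (j : Nat) : List String :=
  (PySem.List.sorted (pvTops m c) (fun g => g) true).take j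


lemma pv_eq_of_mem_nodup {c : List (String × Int)} (hnd : (List.map Prod.fst c).Nodup)
    {p q : String × Int} (hp : p ∈ c) (hq : q ∈ c) (h : p.1 = q.1) : p = q := by
  induction c with
  | nil => simp at hp
  | cons a t ih =>
    simp only [List.map_cons, List.nodup_cons] at hnd
    rcases List.mem_cons.mp hp with rfl | hp' <;> rcases List.mem_cons.mp hq with rfl | hq'
    · rfl
    · exact absurd (h ▸ List.mem_map.mpr ⟨q, hq', rfl⟩) hnd.1
    · exact absurd (List.mem_map.mpr ⟨p, hp', h⟩) hnd.1
    · exact ih hnd.2 hp' hq'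

lemma pv_lookup_of_mem {c : List (String × Int)} (hnd : (List.map Prod.fst c).Nodup)
    {g : String} {v : Int} (hgv : (g, v) ∈ c) : pvLookup c g = v := by
  exact PySem.Dict.getD_of_mem_items (PySem.Dict.mk c) hgv (by simpa [PySem.Dict.keys] using hnd) 0

-- the value an entry of c carries after the decD update
def pvDecF (D : List String) (i m : Int) (p : String × Int) : String × Int :=
  if p.2 == m then (p.1, p.2 - i - (if p.1 ∈ D then (1 : Int) else 0)) else p

lemma pv_decD_eq (D : List String) (i m : Int) (c : List (String × Int)) :
    pvDecD D i m c = (List.map (pvDecF D i m) c).filter (fun p => 0 < p.2) := rfl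

lemma pv_decF_fst (D : List String) (i m : Int) (p : String × Int) :
    (pvDecF D i m p).1 = p.1 := by
  unfold pvDecF; split <;> rfl

lemma pv_decD_cons (D : List String) (i m : Int) (p : String × Int) (t : List (String × Int)) :
    pvDecD D i m (p :: t) =
      if 0 < (pvDecF D i m p).2 then pvDecF D i m p :: pvDecD D i m t else pvDecD D i m t := by
  rw [pv_decD_eq, List.map_cons, List.filter_cons]
  by_cases h : 0 < (pvDecF D i m p).2
  · rw [if_pos (by simpa using h), if_pos h]; rfl
  · rw [if_neg (by simpa using h), if_neg h]; rfl

lemma pv_decF_of_top {D : List String} {i m : Int} {p : String × Int} (h : p.2 = m) :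
    pvDecF D i m p = (p.1, m - i - (if p.1 ∈ D then (1 : Int) else 0)) := by
  unfold pvDecF
  rw [if_pos (by simp [h]), h]

lemma pv_decF_of_other {D : List String} {i m : Int} {p : String × Int} (h : p.2 ≠ m) :
    pvDecF D i m p = p := by
  unfold pvDecF
  rw [if_neg (by simp [h])]

lemma pv_fst_decD (D : List String) (i m : Int) (c : List (String × Int)) :
    (List.map Prod.fst (pvDecD D i m c)).Sublist (List.map Prod.fst c) := by
  rw [pv_decD_eq]
  have h1 := (List.filter_sublist (l := List.map (pvDecF D i m) c)
      (p := fun p => decide (0 < p.2))).map Prod.fst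
  have h3 : List.map Prod.fst (List.map (pvDecF D i m) c) = List.map Prod.fst c := by
    rw [List.map_map]
    apply List.map_congr_left
    intro p _
    simp [pv_decF_fst]
  rw [h3] at h1
  exact h1

lemma pv_decD_nodup {c : List (String × Int)} (hnd : (List.map Prod.fst c).Nodup)
    (D : List String) (i m : Int) : (List.map Prod.fst (pvDecD D i m c)).Nodup :=
  hnd.sublist (pv_fst_decD D i m c)

lemma pv_decD_pos (D : List String) (i m : Int) (c : List (String × Int)) :
    ∀ p ∈ pvDecD D i m c, 1 ≤ p.2 := by
  intro p hp
  rw [pv_decD_eq] at hp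
  have := (List.mem_filter.mp hp).2
  simp at this
  omega

lemma pv_mem_decD {D : List String} {i m : Int} {c : List (String × Int)} {p : String × Int} :
    p ∈ pvDecD D i m c ↔ (∃ q ∈ c, pvDecF D i m q = p) ∧ 0 < p.2 := by
  rw [pv_decD_eq]
  simp [List.mem_filter, List.mem_map, and_comm]

lemma pv_decD_zero {c : List (String × Int)} (hpos : ∀ p ∈ c, 1 ≤ p.2) (m : Int) :
    pvDecD [] 0 m c = c := by
  rw [pv_decD_eq]
  have hmap : List.map (pvDecF [] 0 m) c = c := by
    rw [show pvDecF [] 0 m = id from ?_, List.map_id]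
    funext p
    by_cases h : p.2 = m
    · rw [pv_decF_of_top h]; simp [← h]
    · rw [pv_decF_of_other h]; rfl
  rw [hmap]
  apply List.filter_eq_self.mpr
  intro p hp
  have := hpos p hp
  simp; omega

lemma pv_decD_congr {D D' : List String} (i m : Int) (c : List (String × Int))
    (h : ∀ a, a ∈ D ↔ a ∈ D') : pvDecD D i m c = pvDecD D' i m c := by
  rw [pv_decD_eq, pv_decD_eq]
  congr 1
  apply List.map_congr_left
  intro p _
  unfold pvDecF
  by_cases hm : (p.2 == m) = true
  · rw [if_pos hm, if_pos hm]
    rw [if_congr (h p.1) rfl rfl]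
  · rw [if_neg hm, if_neg hm]

lemma pv_sum_cons (p : String × Int) (t : List (String × Int)) :
    pvSum (p :: t) = p.2 + pvSum t := by simp [pvSum]

lemma pv_sum_decD (D : List String) (i m : Int) (c : List (String × Int))
    (hpos : ∀ p ∈ c, 1 ≤ p.2) (him : 0 ≤ m - i - 1) :
    pvSum (pvDecD D i m c) = pvSum c - i * (c.countP (fun p => p.2 == m) : Int)
      - (c.countP (fun p => p.2 == m && decide (p.1 ∈ D)) : Int) := by
  induction c with
  | nil => simp [pvDecD, pvSum]
  | cons p t ih =>
    have iht := ih (fun q hq => hpos q (by simp [hq]))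
    have hp1 := hpos p (by simp)
    by_cases hv : p.2 = m
    · by_cases hD : p.1 ∈ D
      · rw [List.countP_cons_of_pos (p := fun q : String × Int => q.2 == m) (a := p) (l := t) (by simp [hv]),
            List.countP_cons_of_pos (p := fun q : String × Int => q.2 == m && decide (q.1 ∈ D)) (a := p) (l := t) (by simp [hv, hD]),
            pv_sum_cons, pv_decD_cons, pv_decF_of_top hv, if_pos hD]
        by_cases h0 : (0 : Int) < m - i - 1
        · rw [if_pos (show (0:Int) < ((p.1, m - i - 1) : String × Int).2 from h0), pv_sum_cons, iht]
          push_cast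
          rw [mul_add, mul_one]
          linarith [hv]
        · rw [if_neg (show ¬ (0:Int) < ((p.1, m - i - 1) : String × Int).2 from h0), iht]
          push_cast
          rw [mul_add, mul_one]
          have h00 : m - i - 1 = 0 := by omega
          linarith [hv, h00]
      · rw [List.countP_cons_of_pos (p := fun q : String × Int => q.2 == m) (a := p) (l := t) (by simp [hv]),
            List.countP_cons_of_neg (p := fun q : String × Int => q.2 == m && decide (q.1 ∈ D)) (a := p) (l := t) (by simp [hD]),
            pv_sum_cons, pv_decD_cons, pv_decF_of_top hv, if_neg hD]
        rw [if_pos (show (0:Int) < ((p.1, m - i - 0) : String × Int).2 from by omega), pv_sum_cons, iht]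
        push_cast
        rw [mul_add, mul_one]
        linarith [hv]
    · rw [List.countP_cons_of_neg (p := fun q : String × Int => q.2 == m) (a := p) (l := t) (by simp [hv]),
          List.countP_cons_of_neg (p := fun q : String × Int => q.2 == m && decide (q.1 ∈ D)) (a := p) (l := t) (by simp [hv]),
          pv_sum_cons, pv_decD_cons, pv_decF_of_other hv]
      rw [if_pos (show (0:Int) < p.2 from by omega), pv_sum_cons, iht]
      linarith

lemma pv_countP_names {c : List (String × Int)} {m : Int} (D : List String)
    (hnd : (List.map Prod.fst c).Nodup) (hDnd : D.Nodup)
    (hD : ∀ g ∈ D, (g, m) ∈ c) :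
    c.countP (fun p => p.2 == m && decide (p.1 ∈ D)) = D.length := by
  have h1 : ((List.map Prod.fst (c.filter (fun p => p.2 == m))).filter
      (fun g => decide (g ∈ D))).length = c.countP (fun p => p.2 == m && decide (p.1 ∈ D)) := by
    rw [← List.countP_eq_length_filter, List.countP_map, List.countP_filter]
    apply List.countP_congr
    intro p _
    cases h : (p.2 == m) <;> simp [h]
  rw [← h1]
  have hnsnd : (List.map Prod.fst (c.filter (fun p => p.2 == m))).Nodup :=
    hnd.sublist ((List.filter_sublist).map Prod.fst)
  have hfsnd : ((List.map Prod.fst (c.filter (fun p => p.2 == m))).filter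
      (fun g => decide (g ∈ D))).Nodup := hnsnd.sublist (List.filter_sublist)
  have hsub1 : ((List.map Prod.fst (c.filter (fun p => p.2 == m))).filter
      (fun g => decide (g ∈ D))) ⊆ D := by
    intro g hg
    have := (List.mem_filter.mp hg).2
    simpa using this
  have hsub2 : D ⊆ ((List.map Prod.fst (c.filter (fun p => p.2 == m))).filter
      (fun g => decide (g ∈ D))) := by
    intro g hg
    apply List.mem_filter.mpr
    refine ⟨?_, by simpa using hg⟩
    exact List.mem_map.mpr ⟨(g, m), List.mem_filter.mpr ⟨hD g hg, by simp⟩, rfl⟩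
  exact Nat.le_antisymm ((hfsnd.subperm hsub1).length_le) ((hDnd.subperm hsub2).length_le)

lemma pv_count_decD (i m : Int) (c : List (String × Int))
    (hpos : ∀ p ∈ c, 1 ≤ p.2) (hlt : ∀ p ∈ c, p.2 ≠ m → p.2 < m - i) (him : 0 ≤ m - i - 1) :
    (pvDecD [] i m c).countP (fun p => p.2 == m - i) = c.countP (fun p => p.2 == m) := by
  induction c with
  | nil => simp [pvDecD]
  | cons p t ih =>
    have iht := ih (fun q hq => hpos q (by simp [hq])) (fun q hq h => hlt q (by simp [hq]) h)
    have hp1 := hpos p (by simp)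
    by_cases hv : p.2 = m
    · rw [List.countP_cons_of_pos (p := fun q : String × Int => q.2 == m) (a := p) (l := t) (by simp [hv]),
          pv_decD_cons, pv_decF_of_top hv, if_neg (List.not_mem_nil)]
      rw [if_pos (show (0:Int) < ((p.1, m - i - 0) : String × Int).2 from by omega)]
      rw [List.countP_cons_of_pos (p := fun q : String × Int => q.2 == m - i) (a := ((p.1, m - i - 0) : String × Int)) (by show ((m - i - 0 : Int) == m - i) = true; simp), iht]
    · have hlt' := hlt p (by simp) hv
      rw [List.countP_cons_of_neg (p := fun q : String × Int => q.2 == m) (a := p) (l := t) (by simp [hv]),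
          pv_decD_cons, pv_decF_of_other hv]
      rw [if_pos (show (0:Int) < p.2 from by omega)]
      rw [List.countP_cons_of_neg (p := fun q : String × Int => q.2 == m - i) (a := p) (by simp; omega), iht]

lemma pv_comp1 {c : List (String × Int)} (hpos : ∀ p ∈ c, 1 ≤ p.2) (m : Int)
    (E D : List String) :
    pvDecD E 0 m (pvDecD D 0 m c) = pvDecD (E ++ D) 0 m c := by
  induction c with
  | nil => simp [pvDecD]
  | cons p t ih =>
    have iht := ih (fun q hq => hpos q (by simp [hq]))
    have hp1 := hpos p (by simp)
    rw [pv_decD_cons (E ++ D), pv_decD_cons D]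
    by_cases hv : p.2 = m
    · have hm1 : 1 ≤ m := hv ▸ hp1
      rw [pv_decF_of_top (D := E ++ D) hv, pv_decF_of_top (D := D) hv]
      by_cases hD : p.1 ∈ D
      · rw [if_pos hD, if_pos (show p.1 ∈ E ++ D from by simp [hD])]
        by_cases h2 : (0:Int) < m - 0 - 1
        · rw [if_pos (show (0:Int) < ((p.1, m - 0 - 1) : String × Int).2 from h2),
              if_pos (show (0:Int) < ((p.1, m - 0 - 1) : String × Int).2 from h2),
              pv_decD_cons, pv_decF_of_other (show ((p.1, m - 0 - 1) : String × Int).2 ≠ m from by show m - 0 - 1 ≠ m; omega)]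
          rw [if_pos (show (0:Int) < ((p.1, m - 0 - 1) : String × Int).2 from h2), iht]
        · rw [if_neg (show ¬ (0:Int) < ((p.1, m - 0 - 1) : String × Int).2 from h2),
              if_neg (show ¬ (0:Int) < ((p.1, m - 0 - 1) : String × Int).2 from h2), iht]
      · rw [if_neg hD]
        rw [if_pos (show (0:Int) < ((p.1, m - 0 - 0) : String × Int).2 from by omega)]
        rw [pv_decD_cons, pv_decF_of_top (show ((p.1, m - 0 - 0) : String × Int).2 = m from by simp)]
        by_cases hE : p.1 ∈ E
        · rw [if_pos (show ((p.1, m - 0 - 0) : String × Int).1 ∈ E from hE),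
              if_pos (show p.1 ∈ E ++ D from by simp [hE])]
          by_cases h2 : (0:Int) < m - 0 - 1
          · rw [if_pos (show (0:Int) < (((p.1, m - 0 - 0).1, m - 0 - 1) : String × Int).2 from h2),
                if_pos (show (0:Int) < ((p.1, m - 0 - 1) : String × Int).2 from h2), iht]
          · rw [if_neg (show ¬ (0:Int) < (((p.1, m - 0 - 0).1, m - 0 - 1) : String × Int).2 from h2),
                if_neg (show ¬ (0:Int) < ((p.1, m - 0 - 1) : String × Int).2 from h2), iht]
        · rw [if_neg (show ¬ ((p.1, m - 0 - 0) : String × Int).1 ∈ E from hE),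
              if_neg (show ¬ p.1 ∈ E ++ D from by simp [hE, hD])]
          rw [if_pos (show (0:Int) < (((p.1, m - 0 - 0).1, m - 0 - 0) : String × Int).2 from by show (0:Int) < m - 0 - 0; omega),
              if_pos (show (0:Int) < ((p.1, m - 0 - 0) : String × Int).2 from by show (0:Int) < m - 0 - 0; omega), iht]
    · rw [pv_decF_of_other (D := E ++ D) hv, pv_decF_of_other (D := D) hv]
      rw [if_pos (show (0:Int) < p.2 from by omega), if_pos (show (0:Int) < p.2 from by omega)]
      rw [pv_decD_cons, pv_decF_of_other hv, if_pos (show (0:Int) < p.2 from by omega), iht]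

lemma pv_comp2 {c : List (String × Int)} (hpos : ∀ p ∈ c, 1 ≤ p.2) {m i : Int}
    (hi0 : 0 ≤ i) (him : i + 1 ≤ m) (hlt : ∀ p ∈ c, p.2 ≠ m → p.2 < m - i)
    {D : List String} (hD : ∀ p ∈ c, p.2 = m → p.1 ∈ D) :
    pvDecD D 0 (m - i) (pvDecD [] i m c) = pvDecD [] (i + 1) m c := by
  induction c with
  | nil => simp [pvDecD]
  | cons p t ih =>
    have iht := ih (fun q hq => hpos q (by simp [hq])) (fun q hq h => hlt q (by simp [hq]) h)
      (fun q hq h => hD q (by simp [hq]) h)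
    have hp1 := hpos p (by simp)
    rw [pv_decD_cons ([] : List String) (i + 1), pv_decD_cons ([] : List String) i]
    by_cases hv : p.2 = m
    · have hDp := hD p (by simp) hv
      rw [pv_decF_of_top hv, pv_decF_of_top hv, if_neg (List.not_mem_nil)]
      rw [if_pos (show (0:Int) < ((p.1, m - i - 0) : String × Int).2 from by omega)]
      rw [pv_decD_cons, pv_decF_of_top (show ((p.1, m - i - 0) : String × Int).2 = m - i from by show m - i - 0 = m - i; omega)]
      rw [if_pos (show ((p.1, m - i - 0) : String × Int).1 ∈ D from hDp)]
      by_cases h1 : (0:Int) < m - i - 1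
      · rw [if_pos (show (0:Int) < (((p.1, m - i - 0).1, m - i - 0 - 1) : String × Int).2 from by show (0:Int) < m - i - 0 - 1; omega),
            if_pos (show (0:Int) < ((p.1, m - (i + 1) - 0) : String × Int).2 from by show (0:Int) < m - (i+1) - 0; omega), iht,
            show (((p.1, m - i - 0).1, m - i - 0 - 1) : String × Int) = (p.1, m - (i + 1) - 0) from by simp; omega]
      · rw [if_neg (show ¬ (0:Int) < (((p.1, m - i - 0).1, m - i - 0 - 1) : String × Int).2 from by show ¬ (0:Int) < m - i - 0 - 1; omega),
            if_neg (show ¬ (0:Int) < ((p.1, m - (i + 1) - 0) : String × Int).2 from by show ¬ (0:Int) < m - (i+1) - 0; omega), iht]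
    · have hlt' := hlt p (by simp) hv
      rw [pv_decF_of_other hv, pv_decF_of_other hv]
      rw [if_pos (show (0:Int) < p.2 from by omega), if_pos (show (0:Int) < p.2 from by omega)]
      rw [pv_decD_cons, pv_decF_of_other (show p.2 ≠ m - i from by omega), if_pos (show (0:Int) < p.2 from by omega), iht]

lemma pv_insertBy_desc {α κ : Type} [LinearOrder κ] (key : α → κ) (x : α) (l : List α)
    (h : l.Pairwise (fun a b => key b ≤ key a)) :
    (PySem.List.insertBy (fun a b => decide (key b < key a)) x l).Pairwise
      (fun a b => key b ≤ key a) := by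
  induction l with
  | nil => simp [PySem.List.insertBy]
  | cons y ys ih =>
    by_cases hxy : key y < key x
    · have : PySem.List.insertBy (fun a b => decide (key b < key a)) x (y :: ys) = x :: y :: ys := by
        simp [PySem.List.insertBy, hxy]
      rw [this]
      constructor
      · intro z hz
        rcases List.mem_cons.mp hz with rfl | hz'
        · exact le_of_lt hxy
        · exact le_trans (List.rel_of_pairwise_cons h hz') (le_of_lt hxy)
      · exact h
    · have : PySem.List.insertBy (fun a b => decide (key b < key a)) x (y :: ys)
          = y :: PySem.List.insertBy (fun a b => decide (key b < key a)) x ys := by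
        simp [PySem.List.insertBy, hxy]
      rw [this]
      constructor
      · intro z hz
        rcases (PySem.List.mem_insertBy _ _ _ _).mp hz with rfl | hz'
        · exact not_lt.mp hxy
        · exact List.rel_of_pairwise_cons h hz'
      · exact ih (List.Pairwise.sublist (List.sublist_cons_self y ys) h)

lemma pv_sorted_desc_pairwise {α κ : Type} [LinearOrder κ] (xs : List α) (key : α → κ) :
    (PySem.List.sorted xs key true).Pairwise (fun a b => key b ≤ key a) := by
  rw [PySem.List.sorted_rev_eq_foldl_insertBy]
  have aux : ∀ (l : List α) (acc : List α),
      acc.Pairwise (fun a b => key b ≤ key a) →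
      (List.foldl (fun acc x => PySem.List.insertBy (fun a b => decide (key b < key a)) x acc) acc l).Pairwise
        (fun a b => key b ≤ key a) := by
    intro l
    induction l with
    | nil => intro acc h; simpa using h
    | cons z rest ih =>
      intro acc h
      exact ih _ (pv_insertBy_desc key z acc h)
  exact aux xs [] (by simp)

lemma pv_max2_eq {α κ₁ κ₂ : Type} [LinearOrder κ₁] [LinearOrder κ₂]
    (xs : List α) (k1 : α → κ₁) (k2 : α → κ₂) (x : α) (hx : x ∈ xs)
    (hbest : ∀ y ∈ xs, y ≠ x → k1 y < k1 x ∨ (k1 y = k1 x ∧ k2 y < k2 x)) :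
    PySem.List.max2? xs k1 k2 = some x := by
  have keep : ∀ (ys : List α), (∀ y ∈ ys, y ≠ x → k1 y < k1 x ∨ (k1 y = k1 x ∧ k2 y < k2 x)) →
      List.foldl (fun acc x =>
        match acc with
        | none => some x
        | some m => if (decide (k1 m < k1 x) || !decide (k1 x < k1 m) && decide (k2 m < k2 x)) = true
            then some x else some m) (some x) ys = some x := by
    intro ys
    induction ys with
    | nil => intro _; rfl
    | cons z rest ih =>
      intro hy
      rw [List.foldl_cons]
      have hgen : ∀ (w : Option α), w = some x →
          List.foldl (fun acc x =>
            match acc with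
            | none => some x
            | some m => if (decide (k1 m < k1 x) || !decide (k1 x < k1 m) && decide (k2 m < k2 x)) = true
                then some x else some m) w rest = some x := by
        intro w hw
        rw [hw]
        exact ih (fun y hym hne => hy y (by simp [hym]) hne)
      apply hgen
      show (if (decide (k1 x < k1 z) || !decide (k1 z < k1 x) && decide (k2 x < k2 z)) = true
          then some z else some x) = some x
      have hcond : (decide (k1 x < k1 z) || !decide (k1 z < k1 x) && decide (k2 x < k2 z)) = false := by
        by_cases hzx : z = x
        · subst hzx; simp
        · rcases hy z (by simp) hzx with h | ⟨h1, h2⟩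
          · simp [h, lt_asymm h]
          · simp [h1, lt_asymm h2]
      rw [hcond]
      simp
  have main : ∀ (ys : List α) (acc : Option α), x ∈ ys →
      (∀ y ∈ ys, y ≠ x → k1 y < k1 x ∨ (k1 y = k1 x ∧ k2 y < k2 x)) →
      (∀ a, acc = some a → a = x ∨ (k1 a < k1 x ∨ (k1 a = k1 x ∧ k2 a < k2 x))) →
      List.foldl (fun acc x =>
        match acc with
        | none => some x
        | some m => if (decide (k1 m < k1 x) || !decide (k1 x < k1 m) && decide (k2 m < k2 x)) = true
            then some x else some m) acc ys = some x := by
    intro ys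
    induction ys with
    | nil => intro acc h; simp at h
    | cons z rest ih =>
      intro acc hmem hbest' hacc
      by_cases hzr : x ∈ rest
      · rw [List.foldl_cons]
        apply ih _ hzr (fun y hym hne => hbest' y (by simp [hym]) hne)
        intro a ha
        cases acc with
        | none =>
          have ha' : some z = some a := ha
          injection ha' with h'
          subst h'
          by_cases hzx : z = x
          · exact Or.inl hzx
          · exact Or.inr (hbest' z (by simp) hzx)
        | some b =>
          have ha' : (if (decide (k1 b < k1 z) || !decide (k1 z < k1 b) && decide (k2 b < k2 z)) = true
              then some z else some b) = some a := ha
          split at ha'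
          · injection ha' with h'
            subst h'
            by_cases hzx : z = x
            · exact Or.inl hzx
            · exact Or.inr (hbest' z (by simp) hzx)
          · injection ha' with h'
            subst h'
            exact hacc _ rfl
      · have hzx : z = x := by
          rcases List.mem_cons.mp hmem with h | h
          · exact h.symm
          · exact absurd h hzr
        subst hzx
        rw [List.foldl_cons]
        have hgen : ∀ (w : Option α), w = some z →
            List.foldl (fun acc x =>
              match acc with
              | none => some x
              | some m => if (decide (k1 m < k1 x) || !decide (k1 x < k1 m) && decide (k2 m < k2 x)) = true
                  then some x else some m) w rest = some z := by
          intro w hw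
          rw [hw]
          exact keep rest (fun y hym hne => hbest' y (by simp [hym]) hne)
        apply hgen
        cases acc with
        | none => rfl
        | some b =>
          show (if (decide (k1 b < k1 z) || !decide (k1 z < k1 b) && decide (k2 b < k2 z)) = true
              then some z else some b) = some z
          rcases hacc b rfl with rfl | h | ⟨h1, h2⟩
          · split <;> rfl
          · rw [if_pos (by simp [h])]
          · rw [if_pos (by simp [h1, h2])]
  exact main xs none hx hbest (by simp)

-- basic facts about pvTops and the sorted name list
lemma pv_tops_mem {m : Int} {c : List (String × Int)} {g : String} (h : g ∈ pvTops m c) :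
    (g, m) ∈ c := by
  obtain ⟨q, hq, hfst⟩ := List.mem_map.mp h
  have hq1 := List.mem_filter.mp hq
  have hq2 : q.2 = m := by simpa using hq1.2
  have : q = (g, m) := by
    rw [← hfst, ← hq2]
  exact this ▸ hq1.1

lemma pv_mem_tops {m : Int} {c : List (String × Int)} {g : String} (h : (g, m) ∈ c) :
    g ∈ pvTops m c :=
  List.mem_map.mpr ⟨(g, m), List.mem_filter.mpr ⟨h, by simp⟩, rfl⟩

lemma pv_tops_nodup {m : Int} {c : List (String × Int)}
    (hnd : (List.map Prod.fst c).Nodup) : (pvTops m c).Nodup :=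
  hnd.sublist ((List.filter_sublist).map Prod.fst)

lemma pv_tops_length {m : Int} (c : List (String × Int)) :
    (pvTops m c).length = c.countP (fun p => p.2 == m) := by
  rw [pvTops, List.length_map, List.countP_eq_length_filter]

-- the single-step lemma: one pass of A's loop decrements the (count, name)-largest entry
lemma pv_SL (c : List (String × Int)) (M m : Int) (g : String)
    (hnd : (List.map Prod.fst c).Nodup) (hpos : ∀ p ∈ c, 1 ≤ p.2)
    (hsum : M < pvSum c) (hgm : (g, m) ∈ c)
    (hmax : ∀ p ∈ c, p ≠ (g, m) → p.2 < m ∨ (p.2 = m ∧ p.1 < g)) :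
    pvLoopA c M = pvLoopA (pvDecD [g] 0 m c) M := by
  have hne : c ≠ [] := by
    intro h; rw [h] at hgm; simp at hgm
  have hm1 : 1 ≤ m := hpos _ hgm
  have hgk : g ∈ List.map Prod.fst c := List.mem_map.mpr ⟨(g, m), hgm, rfl⟩
  have hlkg : pvLookup c g = m := pv_lookup_of_mem hnd hgm
  have hmx : PySem.List.max2? (PySem.List.sorted (pvKeys c) (fun g => g) false)
      (fun g => pvLookup c g) (fun g => g) = some g := by
    apply pv_max2_eq
    · exact ((PySem.List.sorted_perm (pvKeys c) (fun g => g) false).mem_iff).mpr hgk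
    · intro y hy hne'
      have hy' : y ∈ pvKeys c :=
        ((PySem.List.sorted_perm (pvKeys c) (fun g => g) false).mem_iff).mp hy
      obtain ⟨q, hq, hfst⟩ := List.mem_map.mp hy'
      have hqmem : (y, q.2) ∈ c := by
        have : q = (y, q.2) := by rw [← hfst]
        exact this ▸ hq
      have hlky : pvLookup c y = q.2 := pv_lookup_of_mem hnd hqmem
      have hqne : (y, q.2) ≠ (g, m) := by
        intro heq
        exact hne' (congrArg Prod.fst heq)
      rcases hmax _ hqmem hqne with h | ⟨h1, h2⟩
      · left; rw [hlky, hlkg]; exact h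
      · right; exact ⟨by rw [hlky, hlkg]; exact h1, h2⟩
  have hmapeq : List.map (pvDecF [g] 0 m) c
      = List.map (fun p => if p.1 == g then (p.1, p.2 - 1) else p) c := by
    apply List.map_congr_left
    intro p hp
    by_cases hpg : p.1 = g
    · have hpe : p = (g, m) := pv_eq_of_mem_nodup hnd hp hgm (by simp [hpg])
      rw [hpe, pv_decF_of_top (show ((g, m) : String × Int).2 = m from rfl)]
      simp
    · by_cases hpm : p.2 = m
      · rw [pv_decF_of_top hpm, if_neg (show ¬ p.1 ∈ [g] from by simp [hpg]),
            if_neg (show ¬ ((p.1 == g) = true) from by simp [hpg])]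
        simp [Prod.ext_iff, hpm]
      · rw [pv_decF_of_other hpm, if_neg (show ¬ ((p.1 == g) = true) from by simp [hpg])]
  have hlk' : pvLookup (pvDec1 g c) g = m - 1 := by
    rw [pvDec1, pv_lookup_map_dec c g hgk, hlkg]
  conv_lhs => rw [pvLoopA]
  rw [dif_pos ⟨hsum, hne⟩]
  simp only [hmx, Option.getD_some]
  by_cases hm2 : 2 ≤ m
  · rw [dif_neg (by rw [hlk']; omega)]
    have harg : pvDecD [g] 0 m c = pvDec1 g c := by
      rw [pv_decD_eq, hmapeq, ← pvDec1]
      apply List.filter_eq_self.mpr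
      intro a ha
      rw [pvDec1] at ha
      obtain ⟨q, hq, hfq⟩ := List.mem_map.mp ha
      by_cases hqg : q.1 = g
      · have hqe : q = (g, m) := pv_eq_of_mem_nodup hnd hq hgm (by simp [hqg])
        rw [hqe] at hfq
        simp at hfq
        rw [← hfq]
        simp; omega
      · rw [if_neg (by simp [hqg])] at hfq
        have := hpos q hq
        rw [← hfq]
        simp; omega
    rw [harg]
  · have hm1' : m = 1 := by omega
    rw [dif_pos (by rw [hlk']; omega)]
    have harg : pvDecD [g] 0 m c = pvErase g (pvDec1 g c) := by
      rw [pv_decD_eq, hmapeq, ← pvDec1, pvErase]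
      apply List.filter_congr
      intro a ha
      rw [pvDec1] at ha
      obtain ⟨q, hq, hfq⟩ := List.mem_map.mp ha
      by_cases hqg : q.1 = g
      · have hqe : q = (g, m) := pv_eq_of_mem_nodup hnd hq hgm (by simp [hqg])
        rw [hqe] at hfq
        simp at hfq
        rw [← hfq]
        simp [hm1']
      · rw [if_neg (by simp [hqg])] at hfq
        have := hpos q hq
        rw [← hfq]
        simp [hqg, show (0:Int) < q.2 from by omega]
    rw [harg]

-- the partial-layer lemma: j units of A's loop remove one from each of the j largest names
-- among the groups at the top count m
lemma pv_PL (c : List (String × Int)) (M m : Int) (j : Nat)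
    (hnd : (List.map Prod.fst c).Nodup) (hpos : ∀ p ∈ c, 1 ≤ p.2)
    (hle : ∀ p ∈ c, p.2 ≤ m) (hm : 1 ≤ m)
    (hj : j ≤ c.countP (fun p => p.2 == m)) (hbud : M + j ≤ pvSum c) :
    pvLoopA c M = pvLoopA (pvDecD (pvTopN c m j) 0 m c) M := by
  induction j with
  | zero =>
    rw [pvTopN, List.take_zero, pv_decD_zero hpos]
  | succ j ih =>
    have hj' : j ≤ c.countP (fun p => p.2 == m) := le_trans (Nat.le_succ j) hj
    have hbud' : M + (j : Int) ≤ pvSum c := by push_cast at hbud ⊢; omega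
    rw [ih hj' hbud']
    have hperm := PySem.List.sorted_perm (pvTops m c) (fun g => g) true
    have hLnd : (PySem.List.sorted (pvTops m c) (fun g => g) true).Nodup :=
      (hperm.nodup_iff).mpr (pv_tops_nodup hnd)
    have hLlen : (PySem.List.sorted (pvTops m c) (fun g => g) true).length
        = c.countP (fun p => p.2 == m) := by
      rw [hperm.length_eq, pv_tops_length]
    have hjlen : j < (PySem.List.sorted (pvTops m c) (fun g => g) true).length := by omega
    set L := PySem.List.sorted (pvTops m c) (fun g => g) true with hLdef
    have hgmem : L[j] ∈ pvTops m c := hperm.mem_iff.mp (List.getElem_mem hjlen)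
    have hgc : (L[j], m) ∈ c := pv_tops_mem hgmem
    have hgtake : L[j] ∉ List.take j L := by
      have hdisj := List.disjoint_of_nodup_append
        (l₁ := List.take j L) (l₂ := List.drop j L)
        (by rw [List.take_append_drop] ; exact hLnd)
      intro hmem
      exact hdisj hmem (by rw [List.drop_eq_getElem_cons hjlen]; exact List.mem_cons.mpr (Or.inl rfl))
    have hsnd := pv_decD_nodup hnd (pvTopN c m j) 0 m
    have hspos := pv_decD_pos (pvTopN c m j) 0 m c
    have htopmem : ∀ g ∈ pvTopN c m j, (g, m) ∈ c := by
      intro g hg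
      exact pv_tops_mem (hperm.mem_iff.mp (List.mem_of_mem_take hg))
    have htopnd : (pvTopN c m j).Nodup := hLnd.sublist (List.take_sublist _ _)
    have htoplen : (pvTopN c m j).length = j := by
      rw [pvTopN, List.length_take]
      rw [hLlen]
      omega
    have hsum_s : pvSum (pvDecD (pvTopN c m j) 0 m c) = pvSum c - j := by
      rw [pv_sum_decD _ _ _ _ hpos (by omega), pv_countP_names _ hnd htopnd htopmem, htoplen]
      push_cast
      ring
    have hsum' : M < pvSum (pvDecD (pvTopN c m j) 0 m c) := by
      rw [hsum_s]
      push_cast at hbud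
      omega
    have hginc : ((L[j] : String), m) ∈ pvDecD (pvTopN c m j) 0 m c := by
      apply pv_mem_decD.mpr
      refine ⟨⟨(L[j], m), hgc, ?_⟩, show (0:Int) < m by omega⟩
      rw [pv_decF_of_top (show ((L[j], m) : String × Int).2 = m from rfl),
          if_neg (show ¬ ((L[j], m) : String × Int).1 ∈ pvTopN c m j from hgtake)]
      simp
    have hpair := pv_sorted_desc_pairwise (pvTops m c) (fun g => g)
    have hmax' : ∀ p ∈ pvDecD (pvTopN c m j) 0 m c, p ≠ (L[j], m) →
        p.2 < m ∨ (p.2 = m ∧ p.1 < L[j]) := by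
      intro p hp hne
      obtain ⟨⟨q, hq, hfq⟩, hp2⟩ := pv_mem_decD.mp hp
      by_cases hqm : q.2 = m
      · by_cases hqt : q.1 ∈ pvTopN c m j
        · rw [pv_decF_of_top hqm, if_pos hqt] at hfq
          left
          rw [← hfq]
          show m - 0 - 1 < m
          omega
        · rw [pv_decF_of_top hqm, if_neg hqt] at hfq
          have hq1m : (q.1, m) ∈ c := by
            have : q = (q.1, m) := by rw [← hqm]
            exact this ▸ hq
          have hq1L : q.1 ∈ L := hperm.mem_iff.mpr (pv_mem_tops hq1m)
          obtain ⟨i, hi, hiq⟩ := List.mem_iff_getElem.mp hq1L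
          have hij : j < i := by
            rcases Nat.lt_trichotomy i j with h | h | h
            · exfalso
              apply hqt
              rw [pvTopN, ← hLdef, ← hiq]
              have hit : i < (List.take j L).length := by
                rw [List.length_take]; omega
              have : (List.take j L)[i] = L[i] := List.getElem_take
              rw [← this]
              exact List.getElem_mem hit
            · exfalso
              apply hne
              subst h
              rw [← hfq, ← hiq]
              simp
            · exact h
          right
          constructor
          · rw [← hfq]
            show m - 0 - 0 = m
            omega
          · have hle' : (fun g => g) L[i] ≤ (fun g => g) L[j] :=
              (List.pairwise_iff_getElem.mp hpair) j i hjlen hi hij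
            have hne' : L[i] ≠ L[j] := by
              intro h
              rw [(hLnd.getElem_inj_iff).mp h] at hij
              omega
            have hlt : L[i] < L[j] := lt_of_le_of_ne hle' hne'
            rw [← hfq, ← hiq]
            simpa using hlt
      · rw [pv_decF_of_other hqm] at hfq
        left
        rw [← hfq]
        exact lt_of_le_of_ne (hle q hq) hqm
    rw [pv_SL (pvDecD (pvTopN c m j) 0 m c) M m L[j] hsnd hspos hsum' hginc hmax']
    rw [pv_comp1 hpos m [L[j]] (pvTopN c m j)]
    have htake : pvTopN c m (j + 1) = pvTopN c m j ++ [L[j]] := by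
      rw [pvTopN, pvTopN, ← hLdef, List.take_succ, List.getElem?_eq_getElem hjlen]
      rfl
    have hDD : pvDecD ([L[j]] ++ pvTopN c m j) 0 m c = pvDecD (pvTopN c m (j + 1)) 0 m c := by
      apply pv_decD_congr
      intro a
      rw [htake]
      simp [or_comm]
    rw [hDD]

lemma pv_peel_eq_decD (m layers : Int) (c : List (String × Int)) :
    pvPeel m layers c = pvDecD [] layers m c := by
  rw [pvPeel, pv_decD_eq]
  congr 1
  apply List.map_congr_left
  intro p _
  by_cases hv : p.2 = m
  · rw [pv_decF_of_top hv, if_pos (by simp [hv])]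
    simp [hv]
  · rw [pv_decF_of_other hv, if_neg (by simp [hv])]

lemma pv_partial_eq_decD {c : List (String × Int)} {m : Int} (D : List String)
    (hnd : (List.map Prod.fst c).Nodup) (hD : ∀ g ∈ D, (g, m) ∈ c) :
    pvPartial D c = pvDecD D 0 m c := by
  rw [pvPartial, pv_decD_eq]
  congr 1
  apply List.map_congr_left
  intro p hp
  by_cases hin : p.1 ∈ D
  · have hpm : p = (p.1, m) := pv_eq_of_mem_nodup hnd hp (hD p.1 hin) rfl
    have hv : p.2 = m := by rw [hpm]
    rw [if_pos hin, pv_decF_of_top hv, if_pos hin]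
    simp [hv]
  · rw [if_neg hin]
    by_cases hv : p.2 = m
    · rw [pv_decF_of_top hv, if_neg hin]
      simp [← hv]
    · rw [pv_decF_of_other hv]

-- K whole layers off the top level, absorbed into A's loop
lemma pv_layers (c : List (String × Int)) (M m m2 : Int) (K : Nat)
    (hnd : (List.map Prod.fst c).Nodup) (hpos : ∀ p ∈ c, 1 ≤ p.2)
    (hle : ∀ p ∈ c, p.2 ≤ m) (hex : ∃ p ∈ c, p.2 = m)
    (hoth : ∀ p ∈ c, p.2 ≠ m → p.2 ≤ m2) (hm2 : 0 ≤ m2)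
    (hK : (K : Int) ≤ m - m2)
    (hbud : M + (K : Int) * (c.countP (fun p => p.2 == m) : Int) ≤ pvSum c) :
    pvLoopA c M = pvLoopA (pvDecD [] (K : Int) m c) M := by
  induction K with
  | zero =>
    rw [Nat.cast_zero, pv_decD_zero hpos]
  | succ K ih =>
    have hm1 : 1 ≤ m := by
      obtain ⟨p, hp, hpm⟩ := hex
      have := hpos p hp
      omega
    have hKm : (K : Int) + 1 ≤ m - m2 := by push_cast at hK; omega
    have htc0 : (0 : Int) ≤ (c.countP (fun p => p.2 == m) : Int) := by positivity
    have ih' := ih (by omega) ?bud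
    case bud =>
      have hexp : ((K + 1 : Nat) : Int) * (c.countP (fun p => p.2 == m) : Int)
          = (K : Int) * (c.countP (fun p => p.2 == m) : Int)
            + (c.countP (fun p => p.2 == m) : Int) := by push_cast; ring
      rw [hexp] at hbud
      linarith
    rw [ih']
    have hlt : ∀ p ∈ c, p.2 ≠ m → p.2 < m - K := by
      intro p hp h
      have := hoth p hp h
      omega
    have hsnd := pv_decD_nodup hnd ([] : List String) (K : Int) m
    have hspos := pv_decD_pos ([] : List String) (K : Int) m c
    have hle' : ∀ p ∈ pvDecD [] (K : Int) m c, p.2 ≤ m - K := by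
      intro p hp
      obtain ⟨⟨q, hq, hfq⟩, _⟩ := pv_mem_decD.mp hp
      by_cases hqm : q.2 = m
      · rw [pv_decF_of_top hqm, if_neg (List.not_mem_nil)] at hfq
        rw [← hfq]
        show m - K - 0 ≤ m - K
        omega
      · rw [pv_decF_of_other hqm] at hfq
        have := hlt q hq hqm
        rw [← hfq]
        omega
    have hm' : (1 : Int) ≤ m - K := by omega
    have hcnt : (pvDecD [] (K : Int) m c).countP (fun p => p.2 == m - K)
        = c.countP (fun p => p.2 == m) :=
      pv_count_decD (K : Int) m c hpos hlt (by omega)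
    have hcnt0 : c.countP (fun p => p.2 == m && decide (p.1 ∈ ([] : List String))) = 0 := by
      simp
    have hsum_s : pvSum (pvDecD [] (K : Int) m c)
        = pvSum c - (K : Int) * (c.countP (fun p => p.2 == m) : Int) := by
      rw [pv_sum_decD _ _ _ _ hpos (by omega), hcnt0]
      push_cast
      ring
    have hbud' : M + ((pvDecD [] (K : Int) m c).countP (fun p => p.2 == m - K) : Int)
        ≤ pvSum (pvDecD [] (K : Int) m c) := by
      rw [hcnt, hsum_s]
      have hexp : ((K + 1 : Nat) : Int) * (c.countP (fun p => p.2 == m) : Int)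
          = (K : Int) * (c.countP (fun p => p.2 == m) : Int)
            + (c.countP (fun p => p.2 == m) : Int) := by push_cast; ring
      rw [hexp] at hbud
      linarith
    rw [pv_PL (pvDecD [] (K : Int) m c) M (m - K)
      ((pvDecD [] (K : Int) m c).countP (fun p => p.2 == m - K))
      hsnd hspos hle' hm' le_rfl hbud']
    have hDfull : ∀ p ∈ c, p.2 = m →
        p.1 ∈ pvTopN (pvDecD [] (K : Int) m c) (m - K)
          ((pvDecD [] (K : Int) m c).countP (fun p => p.2 == m - K)) := by
      intro p hp hpm
      have hmem_s : ((p.1 : String), m - K) ∈ pvDecD [] (K : Int) m c := by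
        apply pv_mem_decD.mpr
        refine ⟨⟨p, hp, ?_⟩, show (0:Int) < m - K by omega⟩
        rw [pv_decF_of_top hpm, if_neg (List.not_mem_nil)]
        simp
      have htops : p.1 ∈ pvTops (m - K) (pvDecD [] (K : Int) m c) := pv_mem_tops hmem_s
      have hperm := PySem.List.sorted_perm (pvTops (m - K) (pvDecD [] (K : Int) m c))
        (fun g => g) true
      have hlen : (PySem.List.sorted (pvTops (m - K) (pvDecD [] (K : Int) m c))
          (fun g => g) true).length
          = (pvDecD [] (K : Int) m c).countP (fun p => p.2 == m - K) := by
        rw [hperm.length_eq, pv_tops_length]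
      rw [pvTopN, List.take_of_length_le (le_of_eq hlen)]
      exact hperm.mem_iff.mpr htops
    have hcomp := pv_comp2 hpos (by omega : (0:Int) ≤ (K : Int))
      (by omega : (K : Int) + 1 ≤ m) hlt hDfull
    rw [hcomp]
    have hcast : ((K + 1 : Nat) : Int) = (K : Int) + 1 := by push_cast; ring
    rw [hcast]

-- the shared first line: capped = {g: v for g, v in sample_counts.items() if v > 0}
lemma pv_capped_eq (sc : List (String × Int)) :
    pvCapped sc = ((PySem.Dict.ofList sc).items).filter (fun p => decide (0 < p.2)) := by
  rw [pvCapped, PySem.List.foldl_ite_eq_foldl_filter (fun p : String × Int => 0 < p.2)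
      (fun d p => d.insert p.1 p.2) ((PySem.Dict.ofList sc).items) PySem.Dict.empty]
  have hnd : (List.map (fun a : String × Int => a.1)
      (((PySem.Dict.ofList sc).items).filter (fun p => decide (0 < p.2)))).Nodup := by
    have h := PySem.Dict.nodup_keys_ofList (κ := String) (ν := Int) sc
    simp only [PySem.Dict.keys] at h
    exact h.sublist ((List.filter_sublist).map _)
  rw [PySem.Dict.items_foldl_insert_fresh
    (l := ((PySem.Dict.ofList sc).items).filter (fun x => decide (0 < x.2)))
    (k := fun a : String × Int => a.1) (v := fun a : String × Int => a.2)
    (d := PySem.Dict.empty) (fun a _ => PySem.Dict.contains_empty _) (by exact hnd)]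
  simp [PySem.Dict.empty]

lemma pv_capped_nodup (sc : List (String × Int)) :
    (List.map Prod.fst (pvCapped sc)).Nodup := by
  rw [pv_capped_eq]
  have h := PySem.Dict.nodup_keys_ofList (κ := String) (ν := Int) sc
  simp only [PySem.Dict.keys] at h
  exact h.sublist ((List.filter_sublist).map _)

lemma pv_capped_pos (sc : List (String × Int)) : ∀ p ∈ pvCapped sc, 1 ≤ p.2 := by
  rw [pv_capped_eq]
  intro p hp
  have := (List.mem_filter.mp hp).2
  simp at this
  omega

-- the main equivalence of the two loops on clean states
lemma pv_main : ∀ (n : Nat) (c : List (String × Int)) (M : Int),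
    pvToNatSum c + c.length ≤ n → (List.map Prod.fst c).Nodup → (∀ p ∈ c, 1 ≤ p.2) →
    pvLoopA c M = pvLoopB c M := by
  intro n
  induction n using Nat.strong_induction_on with
  | _ n IH =>
    intro c M hn hnd hpos
    by_cases hstop : pvSum c - M ≤ 0 ∨ c = []
    · have hA : pvLoopA c M = c := by
        rw [pvLoopA, dif_neg]
        intro ⟨h1, h2⟩
        rcases hstop with h | h
        · omega
        · exact h2 h
      have hB : pvLoopB c M = c := by
        rw [pvLoopB]
        simp only [dif_pos hstop]
      rw [hA, hB]
    · push Not at hstop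
      obtain ⟨hneed, hne⟩ := hstop
      have hneed' : 0 < pvSum c - M := by omega
      -- the values computed by B
      have hvne : pvVals c ≠ [] := by simpa [pvVals] using hne
      have hsome : PySem.List.max? (pvVals c) (fun v => v)
          = some (PySem.List.maxD (pvVals c) (fun v => v) 0) :=
        PySem.List.max?_eq_some_maxD (pvVals c) (fun v => v) 0 hvne
      set m := PySem.List.maxD (pvVals c) (fun v => v) 0 with hmdef
      have hmem : m ∈ List.map Prod.snd c := by
        have := PySem.List.max?_mem hsome
        simpa [pvVals] using this
      have hub : ∀ p ∈ c, p.2 ≤ m := by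
        intro p hp
        exact PySem.List.max?_isMax hsome p.2 (by rw [pvVals]; exact List.mem_map.mpr ⟨p, hp, rfl⟩)
      have hex : ∃ p ∈ c, p.2 = m := by
        obtain ⟨q, hq, hq2⟩ := List.mem_map.mp hmem
        exact ⟨q, hq, hq2⟩
      have hm1 : 1 ≤ m := by
        obtain ⟨p, hp, hpm⟩ := hex
        have := hpos p hp
        omega
      set m2 := PySem.List.maxD ((pvVals c).filter (fun v => !(v == m))) (fun v => v) 0 with hm2def
      have hm2facts : 0 ≤ m2 ∧ m2 ≤ m - 1 ∧ (∀ p ∈ c, p.2 ≠ m → p.2 ≤ m2) := by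
        by_cases hf : (pvVals c).filter (fun v => !(v == m)) = []
        · have hm20 : m2 = 0 := by rw [hm2def, hf]; rfl
          refine ⟨by omega, by omega, ?_⟩
          intro p hp hpm
          exfalso
          have : p.2 ∈ (pvVals c).filter (fun v => !(v == m)) := by
            apply List.mem_filter.mpr
            exact ⟨by rw [pvVals]; exact List.mem_map.mpr ⟨p, hp, rfl⟩, by simp [hpm]⟩
          rw [hf] at this
          simp at this
        · have hsome2 : PySem.List.max? ((pvVals c).filter (fun v => !(v == m))) (fun v => v)
              = some m2 := PySem.List.max?_eq_some_maxD _ (fun v => v) 0 hf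
          have hm2mem := PySem.List.max?_mem hsome2
          have hm2f := List.mem_filter.mp hm2mem
          have hm2ne : m2 ≠ m := by simpa using hm2f.2
          have hm2v : m2 ∈ List.map Prod.snd c := by simpa [pvVals] using hm2f.1
          obtain ⟨q, hq, hq2⟩ := List.mem_map.mp hm2v
          have hq1 := hpos q hq
          have hq3 := hub q hq
          refine ⟨by omega, by omega, ?_⟩
          intro p hp hpm
          exact PySem.List.max?_isMax hsome2 p.2 (List.mem_filter.mpr
            ⟨by rw [pvVals]; exact List.mem_map.mpr ⟨p, hp, rfl⟩, by simp [hpm]⟩)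
      obtain ⟨hm20, hm21, hoth⟩ := hm2facts
      set tc : Int := (((pvVals c).countP (fun v => v == m)) : Int) with htcdef
      have htc_eq : ((pvVals c).countP (fun v => v == m)) = c.countP (fun p => p.2 == m) := by
        rw [pvVals, List.countP_map]
        rfl
      have htcpos : (0 : Int) < tc := by
        rw [htcdef]
        have : 0 < (pvVals c).countP (fun v => v == m) := by
          apply List.countP_pos_iff.mpr
          exact ⟨m, by simpa [pvVals] using hmem, by simp⟩
        exact_mod_cast this
      set layers := min (PySem.Int.floordiv (pvSum c - M) tc) (m - m2) with hldef
      by_cases hl : 1 ≤ layers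
      · -- bulk peel branch
        have hlay_tc : layers * tc ≤ pvSum c - M :=
          (PySem.Int.le_floordiv_iff_mul_le htcpos).mp (min_le_left _ _)
        have hlay_m : layers ≤ m - m2 := min_le_right _ _
        have hB : pvLoopB c M = pvLoopB (pvPeel m layers c) M := by
          conv_lhs => rw [pvLoopB]
          rw [dif_neg (by push Not; exact ⟨by omega, hne⟩)]
          simp only [← hmdef, ← hm2def, ← htcdef, ← hldef, dif_pos hl]
        have hmeas := pv_measB_lt c m layers hne hmem (fun v hv => by
          obtain ⟨q, hq, hq2⟩ := List.mem_map.mp hv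
          exact hq2 ▸ hub q hq) hl
        have hpool : pvPeel m layers c = pvDecD [] layers m c := pv_peel_eq_decD m layers c
        have hA : pvLoopA c M = pvLoopA (pvPeel m layers c) M := by
          rw [hpool]
          have hKl : ((layers.toNat : Nat) : Int) = layers := Int.toNat_of_nonneg (by omega)
          rw [← hKl]
          apply pv_layers c M m m2 layers.toNat hnd hpos hub hex hoth hm20 (by rw [hKl]; exact hlay_m)
          rw [hKl, ← htc_eq, ← htcdef]
          omega
        rw [hA, hB]
        have hnodup' : (List.map Prod.fst (pvPeel m layers c)).Nodup := by
          rw [hpool]; exact pv_decD_nodup hnd _ _ _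
        have hpos' : ∀ p ∈ pvPeel m layers c, 1 ≤ p.2 := by
          rw [hpool]; exact pv_decD_pos _ _ _ _
        exact IH (pvToNatSum (pvPeel m layers c) + (pvPeel m layers c).length)
          (lt_of_lt_of_le hmeas hn) _ M le_rfl hnodup' hpos'
      · -- partial layer branch
        have hmm2 : 1 ≤ m - m2 := by omega
        have hfd : PySem.Int.floordiv (pvSum c - M) tc < 1 := by
          by_contra h
          push Not at h
          have : 1 ≤ layers := by rw [hldef]; exact le_min h hmm2
          exact hl this
        have hlt_tc : pvSum c - M < tc := by
          have := (PySem.Int.floordiv_lt_iff_lt_mul htcpos).mp hfd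
          omega
        have hjc : (((pvSum c - M).toNat : Nat) : Int) = pvSum c - M :=
          Int.toNat_of_nonneg (by omega)
        have hjle : (pvSum c - M).toNat ≤ c.countP (fun p => p.2 == m) := by
          have : (((pvSum c - M).toNat : Nat) : Int) < (c.countP (fun p => p.2 == m) : Int) := by
            rw [hjc, ← htc_eq, ← htcdef]; exact hlt_tc
          exact_mod_cast le_of_lt this
        have hA : pvLoopA c M
            = pvLoopA (pvDecD (pvTopN c m (pvSum c - M).toNat) 0 m c) M := by
          apply pv_PL c M m _ hnd hpos hub hm1 hjle
          rw [hjc]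
          omega
        -- the state sums exactly to M, so A's loop stops
        have hperm := PySem.List.sorted_perm (pvTops m c) (fun g => g) true
        have htopmem : ∀ g ∈ pvTopN c m (pvSum c - M).toNat, (g, m) ∈ c := by
          intro g hg
          exact pv_tops_mem (hperm.mem_iff.mp (List.mem_of_mem_take hg))
        have htopnd : (pvTopN c m (pvSum c - M).toNat).Nodup :=
          ((hperm.nodup_iff).mpr (pv_tops_nodup hnd)).sublist (List.take_sublist _ _)
        have htoplen : (pvTopN c m (pvSum c - M).toNat).length = (pvSum c - M).toNat := by
          rw [pvTopN, List.length_take, hperm.length_eq, pv_tops_length]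
          omega
        have hsum_s : pvSum (pvDecD (pvTopN c m (pvSum c - M).toNat) 0 m c) = M := by
          rw [pv_sum_decD _ _ _ _ hpos (by omega),
            pv_countP_names _ hnd htopnd htopmem, htoplen]
          push_cast
          rw [hjc]
          ring
        have hstopA : pvLoopA (pvDecD (pvTopN c m (pvSum c - M).toNat) 0 m c) M
            = pvDecD (pvTopN c m (pvSum c - M).toNat) 0 m c := by
          rw [pvLoopA, dif_neg]
          intro ⟨h1, _⟩
          rw [hsum_s] at h1
          omega
        have hB : pvLoopB c M = pvPartial (pvTopN c m (pvSum c - M).toNat) c := by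
          conv_lhs => rw [pvLoopB]
          rw [dif_neg (by push Not; exact ⟨by omega, hne⟩)]
          simp only [← hmdef, ← hm2def, ← htcdef, ← hldef, dif_neg hl]
          rfl
        rw [hA, hstopA, hB, pv_partial_eq_decD _ hnd htopmem]

-- ===== VERDICT (by name: the statement is the Claim_ definition above) =====
theorem cap_sample_counts_py_spec : Claim_equal_cap_sample_counts_py := by
  intro sc M _
  unfold Spec_cap_sample_counts_py
  show cap_sample_counts_py sc M = cap_sample_counts_py_alt sc M
  rw [cap_sample_counts_py, cap_sample_counts_py_alt]
  exact pv_main (pvToNatSum (pvCapped sc) + (pvCapped sc).length) _ M le_rfl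
    (pv_capped_nodup sc) (pv_capped_pos sc)
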